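-- pv_equiv track=rewrite | github.com/tresoldi/criticaldante | transcription2nexus.py | fix_state_label
-- ===== SOURCE A (Python) =====
-- def fix_state_label(label):
--     # simple fixes
--     label = label.replace(' ', '_')
--     label = label.replace('**', ']')
--     label = label.replace('*', '[')
--
--     # manually fix unicode escape problems - as there is no consistency in
--     # some transcriptions, this needs to be performed "by hand" on all
--     # escaped points
--     REPLACES = [
--         ['&middot;', '·'],
--         ['&ugrave;', 'ù'],
--         ['&ograve;', 'ò'],
--         ['&#x0303;', '~'], # replacing but normal (not combining) tilde
--         ['&#x00F5;', 'õ'],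
--         ['&#x0103;', 'ă'],
--         ['&nbsp;', '_'],   # replacing by underscore, as spaces are separators
--         ['&#x014D;', 'ō'],
--         ['&#x016B;', 'ū'],
--         ['&#x012B;', 'ī'],
--         ['&#xF145;', 'm'], # error in the trancription
--         ['&#x0113;', 'ē'],
--         ['&#x0304;', '-'], # replacing combining macro
--         ['&#xF147;', '[p]'], # error in trascription, Z_28_055_5
--     ]
--
--     for replace in REPLACES:
--         label = label.replace(replace[0], replace[1])
--
--     return label
-- ===== SOURCE B (Python) =====
-- # Single left-to-right pass over the label with an ordered replacement table
-- # ('**' listed before '*' so it takes precedence), instead of 17 full-string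
-- # .replace() passes.
-- TABLE = {
--     ' ': '_',
--     '**': ']',
--     '*': '[',
--     '&middot;': '\u00b7',
--     '&ugrave;': '\u00f9',
--     '&ograve;': '\u00f2',
--     '&#x0303;': '~',
--     '&#x00F5;': '\u00f5',
--     '&#x0103;': '\u0103',
--     '&nbsp;': '_',
--     '&#x014D;': '\u014d',
--     '&#x016B;': '\u016b',
--     '&#x012B;': '\u012b',
--     '&#xF145;': 'm',
--     '&#x0113;': '\u0113',
--     '&#x0304;': '-',
--     '&#xF147;': '[p]',
-- }
--
-- def fix_state_label(label):
--     out = []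
--     i = 0
--     n = len(label)
--     while i < n:
--         for old, new in TABLE.items():
--             if label.startswith(old, i):
--                 out.append(new)
--                 i += len(old)
--                 break
--         else:
--             out.append(label[i])
--             i += 1
--     return ''.join(out)
-- ===== Notes on version B (the rewrite author's own statement) =====
-- stated objective: alternative
-- what changed: Replaces A's 17 sequential full-string .replace() passes by one left-to-right scan that consults an ordered replacement table at each position ('**' before '*'), emitting the replacement and skipping the matched key, or copying the character.
import Mathlib
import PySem

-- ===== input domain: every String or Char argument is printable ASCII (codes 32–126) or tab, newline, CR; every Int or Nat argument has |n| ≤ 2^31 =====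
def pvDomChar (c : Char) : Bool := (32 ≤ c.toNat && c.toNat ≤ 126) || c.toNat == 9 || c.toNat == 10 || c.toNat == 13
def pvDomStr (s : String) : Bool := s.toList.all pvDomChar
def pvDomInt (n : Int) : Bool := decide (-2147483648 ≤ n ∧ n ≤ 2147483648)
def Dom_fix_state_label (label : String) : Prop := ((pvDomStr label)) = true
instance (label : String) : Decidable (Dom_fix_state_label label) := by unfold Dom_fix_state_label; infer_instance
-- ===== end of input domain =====

-- B replaces A's 17 sequential full-string .replace() passes by one left-to-right
-- scan over the label consulting an ordered replacement table at each position
-- ('**' listed before '*'); same return value, no speed claim.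

-- ===== PORT A =====
def pvREPLACES : List (String × String) := [
  ("&middot;", "·"), ("&ugrave;", "ù"), ("&ograve;", "ò"), ("&#x0303;", "~"),
  ("&#x00F5;", "õ"), ("&#x0103;", "ă"), ("&nbsp;", "_"), ("&#x014D;", "ō"),
  ("&#x016B;", "ū"), ("&#x012B;", "ī"), ("&#xF145;", "m"), ("&#x0113;", "ē"),
  ("&#x0304;", "-"), ("&#xF147;", "[p]")]

def fix_state_label (label : String) : String :=
  let l1 := PySem.Str.replace label " " "_"
  let l2 := PySem.Str.replace l1 "**" "]"
  let l3 := PySem.Str.replace l2 "*" "["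
  pvREPLACES.foldl (fun acc pr => PySem.Str.replace acc pr.1 pr.2) l3

-- ===== PORT B =====
-- Source B's ordered replacement TABLE, as char lists
def pvTable : List (List Char × List Char) := [
  ([' '], ['_']),
  (['*', '*'], [']']),
  (['*'], ['[']),
  (['&', 'm', 'i', 'd', 'd', 'o', 't', ';'], ['·']),
  (['&', 'u', 'g', 'r', 'a', 'v', 'e', ';'], ['ù']),
  (['&', 'o', 'g', 'r', 'a', 'v', 'e', ';'], ['ò']),
  (['&', '#', 'x', '0', '3', '0', '3', ';'], ['~']),
  (['&', '#', 'x', '0', '0', 'F', '5', ';'], ['õ']),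
  (['&', '#', 'x', '0', '1', '0', '3', ';'], ['ă']),
  (['&', 'n', 'b', 's', 'p', ';'], ['_']),
  (['&', '#', 'x', '0', '1', '4', 'D', ';'], ['ō']),
  (['&', '#', 'x', '0', '1', '6', 'B', ';'], ['ū']),
  (['&', '#', 'x', '0', '1', '2', 'B', ';'], ['ī']),
  (['&', '#', 'x', 'F', '1', '4', '5', ';'], ['m']),
  (['&', '#', 'x', '0', '1', '1', '3', ';'], ['ē']),
  (['&', '#', 'x', '0', '3', '0', '4', ';'], ['-']),
  (['&', '#', 'x', 'F', '1', '4', '7', ';'], ['[', 'p', ']'])]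

-- the while loop of Source B: at each position take the first table key that matches
-- (for/else), else copy the char; the counter mirrors Source B's index bound i < n
def pvScanGo : Nat → List Char → List Char
  | 0, _ => []
  | _ + 1, [] => []
  | fuel + 1, c :: t =>
    match pvTable.find? (fun pr => pr.1.isPrefixOf (c :: t)) with
    | some (p, r) => r ++ pvScanGo fuel ((c :: t).drop p.length)
    | none => c :: pvScanGo fuel t

def fix_state_label_alt (label : String) : String :=
  String.ofList (pvScanGo label.toList.length label.toList)

-- ===== PRECONDITION & SPEC =====
def Spec_fix_state_label (label : String) (out : String) : Prop := out = fix_state_label_alt label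
instance (label : String) (out : String) : Decidable (Spec_fix_state_label label out) := by unfold Spec_fix_state_label; infer_instance

-- ===== CLAIM (what is proved, stated in full; the proofs are below) =====
def Claim_equal_fix_state_label : Prop := ∀ (label : String), Dom_fix_state_label label → Spec_fix_state_label label (fix_state_label label)

-- ===== LEMMAS AND PROOFS =====

-- A's chain of replaces, at the char-list level, over the same table
def pvApplyAll (t : List (List Char × List Char)) (l : List Char) : List Char :=
  t.foldl (fun acc pr => PySem.Chars.replace acc pr.1 pr.2) l

-- -------- basic equations for PySem.Chars.replace (old ≠ []) --------

theorem pvGo_zero (old new l acc : List Char) :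
    PySem.Chars.replace.go old new 0 l acc = acc.reverse ++ l := by
  rw [PySem.Chars.replace.go]

theorem pvGo_nil (old new acc : List Char) (fuel : Nat) :
    PySem.Chars.replace.go old new fuel [] acc = acc.reverse := by
  cases fuel with
  | zero => rw [PySem.Chars.replace.go]; simp
  | succ n => rw [PySem.Chars.replace.go]; simp

theorem pvGo_pos (old new : List Char) (c : Char) (t acc : List Char) (fuel : Nat)
    (h : old.isPrefixOf (c :: t) = true) :
    PySem.Chars.replace.go old new (fuel + 1) (c :: t) acc
      = PySem.Chars.replace.go old new fuel (List.drop old.length (c :: t)) (new.reverse ++ acc) := by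
  rw [PySem.Chars.replace.go]; simp [h]

theorem pvGo_neg (old new : List Char) (c : Char) (t acc : List Char) (fuel : Nat)
    (h : old.isPrefixOf (c :: t) = false) :
    PySem.Chars.replace.go old new (fuel + 1) (c :: t) acc
      = PySem.Chars.replace.go old new fuel t (c :: acc) := by
  rw [PySem.Chars.replace.go]; simp [h]

theorem pvGo_acc (old new : List Char) :
    ∀ (fuel : Nat) (l acc : List Char),
      PySem.Chars.replace.go old new fuel l acc
        = acc.reverse ++ PySem.Chars.replace.go old new fuel l [] := by
  intro fuel
  induction fuel with
  | zero => intro l acc; rw [pvGo_zero, pvGo_zero]; simp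
  | succ n ih =>
    intro l acc
    cases l with
    | nil => rw [pvGo_nil, pvGo_nil]; simp
    | cons c t =>
      cases h : old.isPrefixOf (c :: t) with
      | true =>
        rw [pvGo_pos _ _ _ _ _ _ h, pvGo_pos _ _ _ _ _ _ h,
            ih _ (new.reverse ++ acc), ih _ (new.reverse ++ [])]
        simp
      | false =>
        rw [pvGo_neg _ _ _ _ _ _ h, pvGo_neg _ _ _ _ _ _ h, ih _ (c :: acc), ih _ [c]]
        simp

theorem pvGo_fuel (old new : List Char) (hold : old ≠ []) :
    ∀ (f f' : Nat) (l : List Char), l.length ≤ f → l.length ≤ f' →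
      PySem.Chars.replace.go old new f l [] = PySem.Chars.replace.go old new f' l [] := by
  intro f
  induction f with
  | zero =>
    intro f' l hf _
    have : l = [] := by cases l <;> simp_all
    subst this
    rw [pvGo_zero, pvGo_nil]
    simp
  | succ n ih =>
    intro f' l hf hf'
    cases l with
    | nil => simp [pvGo_nil]
    | cons c t =>
      cases f' with
      | zero => simp at hf'
      | succ m =>
        cases h : old.isPrefixOf (c :: t) with
        | true =>
          rw [pvGo_pos _ _ _ _ _ _ h, pvGo_pos _ _ _ _ _ _ h, pvGo_acc, pvGo_acc _ _ m]
          have hlen : (List.drop old.length (c :: t)).length ≤ n ∧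
              (List.drop old.length (c :: t)).length ≤ m := by
            have hop : 0 < old.length := List.length_pos_of_ne_nil hold
            simp only [List.length_drop, List.length_cons] at *
            omega
          rw [ih m _ hlen.1 hlen.2]
        | false =>
          rw [pvGo_neg _ _ _ _ _ _ h, pvGo_neg _ _ _ _ _ _ h, pvGo_acc, pvGo_acc _ _ m]
          have hl : t.length ≤ n ∧ t.length ≤ m := by
            simp only [List.length_cons] at *
            omega
          rw [ih m _ hl.1 hl.2]

theorem pvReplace_eq_go (old new l : List Char) (h : old ≠ []) :
    PySem.Chars.replace l old new = PySem.Chars.replace.go old new l.length l [] := by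
  rw [PySem.Chars.replace]; simp [h]

theorem pvReplace_nil (old new : List Char) (h : old ≠ []) :
    PySem.Chars.replace [] old new = [] := by
  rw [pvReplace_eq_go _ _ _ h]
  simp [pvGo_nil]

theorem pvReplace_cons (old new : List Char) (c : Char) (t : List Char)
    (hold : old ≠ []) (h : ¬ old <+: (c :: t)) :
    PySem.Chars.replace (c :: t) old new = c :: PySem.Chars.replace t old new := by
  have hb : old.isPrefixOf (c :: t) = false := by
    cases hx : old.isPrefixOf (c :: t) with
    | false => rfl
    | true => exact absurd (List.isPrefixOf_iff_prefix.mp hx) h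
  rw [pvReplace_eq_go _ _ _ hold, pvReplace_eq_go _ _ _ hold]
  simp only [List.length_cons]
  rw [pvGo_neg _ _ _ _ _ _ hb, pvGo_acc]
  simp

theorem pvReplace_prefix (old new t : List Char) (hold : old ≠ []) :
    PySem.Chars.replace (old ++ t) old new = new ++ PySem.Chars.replace t old new := by
  obtain ⟨o, old', rfl⟩ : ∃ o old', old = o :: old' := by
    cases old with
    | nil => exact absurd rfl hold
    | cons o old' => exact ⟨o, old', rfl⟩
  have hb : (o :: old').isPrefixOf ((o :: old') ++ t) = true := by
    simp [List.isPrefixOf_iff_prefix]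
  have hlen : ((o :: old') ++ t).length = (old'.length + t.length) + 1 := by
    simp
  rw [pvReplace_eq_go _ _ _ hold, hlen]
  have hcons : (o :: old') ++ t = o :: (old' ++ t) := rfl
  rw [hcons] at hb ⊢
  rw [pvGo_pos _ _ _ _ _ _ hb]
  have hdrop : List.drop (o :: old').length (o :: (old' ++ t)) = t := by
    have : (o :: (old' ++ t)) = (o :: old') ++ t := rfl
    rw [this, List.drop_left]
  rw [hdrop, pvGo_acc]
  rw [pvGo_fuel _ _ hold _ t.length _ (by omega) (le_refl _)]
  rw [pvReplace_eq_go _ _ _ hold]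
  simp

-- a prefix avoiding the replacement's characters pulls back through a replace
theorem pvPrefix_pullback (old new : List Char) (hold : old ≠ []) (hnew : new ≠ []) :
    ∀ (n : Nat) (l s : List Char), l.length ≤ n →
      (∀ ch ∈ new, ch ∉ s) → s <+: PySem.Chars.replace l old new → s <+: l := by
  intro n
  induction n with
  | zero =>
    intro l s hl _ hp
    have : l = [] := by cases l <;> simp_all
    subst this
    rwa [pvReplace_nil _ _ hold] at hp
  | succ n ih =>
    intro l s hl hdisj hp
    by_cases hpre : old <+: l
    · obtain ⟨t, rfl⟩ := hpre
      rw [pvReplace_prefix _ _ _ hold] at hp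
      cases s with
      | nil => exact List.nil_prefix
      | cons ch s' =>
        obtain ⟨n0, new', rfl⟩ : ∃ n0 new', new = n0 :: new' := by
          cases new with
          | nil => exact absurd rfl hnew
          | cons n0 new' => exact ⟨n0, new', rfl⟩
        rw [List.cons_append] at hp
        have : ch = n0 := (List.cons_prefix_cons.mp hp).1
        exact absurd (this ▸ List.mem_cons_self) (hdisj n0 List.mem_cons_self)
    · cases l with
      | nil =>
        rw [pvReplace_nil _ _ hold] at hp
        simpa using hp
      | cons c t =>
        rw [pvReplace_cons _ _ _ _ hold hpre] at hp
        cases s with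
        | nil => exact List.nil_prefix
        | cons ch s' =>
          obtain ⟨hch, hp'⟩ := List.cons_prefix_cons.mp hp
          subst hch
          have hs' : s' <+: t := by
            refine ih t s' (by simp at hl; omega) ?_ hp'
            intro x hx hxs
            exact hdisj x hx (List.mem_cons_of_mem _ hxs)
          exact List.cons_prefix_cons.mpr ⟨rfl, hs'⟩

-- a segment the pattern cannot start in passes through a replace unchanged
theorem pvReplace_pass (old new : List Char) (hold : old ≠ []) :
    ∀ (p t : List Char), ¬ old <+: (p ++ t) → (∀ ch ∈ p.drop 1, ch ≠ old.headI) →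
      PySem.Chars.replace (p ++ t) old new = p ++ PySem.Chars.replace t old new := by
  intro p
  induction p with
  | nil => intro t _ _; simp
  | cons c p' ih =>
    intro t hnp hh
    have hstep : PySem.Chars.replace ((c :: p') ++ t) old new
        = c :: PySem.Chars.replace (p' ++ t) old new := by
      exact pvReplace_cons _ _ _ _ hold (by simpa using hnp)
    rw [hstep]
    cases p' with
    | nil => simp
    | cons d p'' =>
      have hnp' : ¬ old <+: ((d :: p'') ++ t) := by
        intro hcon
        obtain ⟨o, old', rfl⟩ : ∃ o old', old = o :: old' := by
          cases old with
          | nil => exact absurd rfl hold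
          | cons o old' => exact ⟨o, old', rfl⟩
        obtain ⟨ho, _⟩ := List.cons_prefix_cons.mp hcon
        have hd : d ∈ (c :: d :: p'').drop 1 := by simp
        exact hh d hd (by simp [← ho])
      have hh' : ∀ ch ∈ (d :: p'').drop 1, ch ≠ old.headI := by
        intro ch hch
        exact hh ch (by simp at hch ⊢; exact Or.inr hch)
      rw [ih t hnp' hh']
      simp

-- -------- table-level lemmas --------

theorem pvApplyAll_nil :
    ∀ (t : List (List Char × List Char)), (∀ pr ∈ t, pr.1 ≠ []) →
      pvApplyAll t [] = [] := by
  intro t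
  induction t with
  | nil => intro _; rfl
  | cons pr t' ih =>
    intro hw
    have h1 : pr.1 ≠ [] := (hw pr List.mem_cons_self)
    show pvApplyAll t' (PySem.Chars.replace [] pr.1 pr.2) = []
    rw [pvReplace_nil _ _ h1]
    exact ih (fun q hq => hw q (List.mem_cons_of_mem _ hq))

theorem pvApplyAll_nomatch :
    ∀ (t : List (List Char × List Char)) (c : Char) (xs : List Char),
      (∀ pr ∈ t, pr.1 ≠ [] ∧ pr.2 ≠ []) →
      t.Pairwise (fun a b => ∀ ch ∈ a.2, ch ∉ b.1) →
      (∀ pr ∈ t, ¬ pr.1 <+: (c :: xs)) →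
      pvApplyAll t (c :: xs) = c :: pvApplyAll t xs := by
  intro t
  induction t with
  | nil => intro c xs _ _ _; rfl
  | cons pr t' ih =>
    intro c xs hw h1 hnm
    obtain ⟨p, r⟩ := pr
    have hp : p ≠ [] := (hw (p, r) List.mem_cons_self).1
    have hr : r ≠ [] := (hw (p, r) List.mem_cons_self).2
    have hstep : pvApplyAll ((p, r) :: t') (c :: xs)
        = pvApplyAll t' (PySem.Chars.replace (c :: xs) p r) := rfl
    rw [hstep, pvReplace_cons _ _ _ _ hp (hnm (p, r) List.mem_cons_self)]
    have hhead := List.pairwise_cons.mp h1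
    have hnm' : ∀ q ∈ t', ¬ q.1 <+: (c :: PySem.Chars.replace xs p r) := by
      intro q hq hcon
      obtain ⟨ql, qr⟩ := q
      have hq1 : ql ≠ [] := (hw (ql, qr) (List.mem_cons_of_mem _ hq)).1
      obtain ⟨q0, q'', rfl⟩ : ∃ q0 q'', ql = q0 :: q'' := by
        cases ql with
        | nil => exact absurd rfl hq1
        | cons q0 q'' => exact ⟨q0, q'', rfl⟩
      simp only at hcon
      obtain ⟨hq0, hq''⟩ := List.cons_prefix_cons.mp hcon
      have hdisj : ∀ ch ∈ r, ch ∉ q'' := by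
        intro ch hch hin
        exact hhead.1 (q0 :: q'', qr) hq ch hch (by simp [hin])
      have := pvPrefix_pullback p r hp hr xs.length xs q'' (le_refl _) hdisj hq''
      exact hnm (q0 :: q'', qr) (List.mem_cons_of_mem _ hq)
        (by subst hq0; exact List.cons_prefix_cons.mpr ⟨rfl, this⟩)
    have := ih c (PySem.Chars.replace xs p r)
      (fun q hq => hw q (List.mem_cons_of_mem _ hq)) hhead.2 hnm'
    rw [this]
    rfl

theorem pvApplyAll_pass :
    ∀ (t : List (List Char × List Char)) (r u : List Char), r ≠ [] →
      (∀ pr ∈ t, pr.1 ≠ [] ∧ pr.1.headI ∉ r) →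
      pvApplyAll t (r ++ u) = r ++ pvApplyAll t u := by
  intro t
  induction t with
  | nil => intro r u _ _; rfl
  | cons pr t' ih =>
    intro r u hr hh
    obtain ⟨q, s⟩ := pr
    have hq : q ≠ [] := (hh (q, s) List.mem_cons_self).1
    have hqh : q.headI ∉ r := (hh (q, s) List.mem_cons_self).2
    have hnp : ¬ q <+: (r ++ u) := by
      intro hcon
      obtain ⟨q0, q', rfl⟩ : ∃ q0 q', q = q0 :: q' := by
        cases q with
        | nil => exact absurd rfl hq
        | cons q0 q' => exact ⟨q0, q', rfl⟩
      obtain ⟨r0, r', rfl⟩ : ∃ r0 r', r = r0 :: r' := by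
        cases r with
        | nil => exact absurd rfl hr
        | cons r0 r' => exact ⟨r0, r', rfl⟩
      obtain ⟨h0, _⟩ := List.cons_prefix_cons.mp hcon
      simp at hqh
      exact hqh.1 (by simpa using h0)
    have hstep : pvApplyAll ((q, s) :: t') (r ++ u)
        = pvApplyAll t' (PySem.Chars.replace (r ++ u) q s) := rfl
    rw [hstep, pvReplace_pass q s hq r u hnp (fun ch hch hce =>
      hqh (hce ▸ (List.mem_of_mem_drop hch)))]
    rw [ih r (PySem.Chars.replace u q s) hr (fun pr hpr => hh pr (List.mem_cons_of_mem _ hpr))]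
    rfl

theorem pvHeadI_mem {l : List Char} (h : l ≠ []) : l.headI ∈ l := by
  cases l with
  | nil => exact absurd rfl h
  | cons c t => exact List.mem_cons_self

theorem pvApplyAll_match :
    ∀ (t₁ : List (List Char × List Char)) (p r : List Char)
      (t₂ : List (List Char × List Char)) (rest : List Char),
      (∀ pr ∈ (t₁ ++ (p, r) :: t₂), pr.1 ≠ [] ∧ pr.2 ≠ []) →
      (t₁ ++ (p, r) :: t₂).Pairwise (fun a b => ∀ ch ∈ a.2, ch ∉ b.1) →
      (t₁ ++ (p, r) :: t₂).Pairwise (fun a b => a.1.headI ∉ b.1.drop 1) →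
      (∀ q ∈ t₁, ¬ q.1 <+: (p ++ rest)) →
      pvApplyAll (t₁ ++ (p, r) :: t₂) (p ++ rest)
        = r ++ pvApplyAll (t₁ ++ (p, r) :: t₂) rest := by
  intro t₁
  induction t₁ with
  | nil =>
    intro p r t₂ rest hw h1 h2 _
    have hp : p ≠ [] := (hw (p, r) (by simp)).1
    have hr : r ≠ [] := (hw (p, r) (by simp)).2
    have hstep : pvApplyAll ([] ++ (p, r) :: t₂) (p ++ rest)
        = pvApplyAll t₂ (PySem.Chars.replace (p ++ rest) p r) := rfl
    rw [hstep, pvReplace_prefix _ _ _ hp]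
    have h1c : ((p, r) :: t₂).Pairwise (fun a b => ∀ ch ∈ a.2, ch ∉ b.1) := by
      simpa using h1
    have hhead := List.pairwise_cons.mp h1c
    have hpass : ∀ pr ∈ t₂, pr.1 ≠ [] ∧ pr.1.headI ∉ r := by
      intro pr hpr
      have hne : pr.1 ≠ [] := (hw pr (by simp [hpr])).1
      refine ⟨hne, fun hin => ?_⟩
      exact hhead.1 pr hpr pr.1.headI hin (pvHeadI_mem hne)
    rw [pvApplyAll_pass t₂ r _ hr hpass]
    rfl
  | cons qs t₁' ih =>
    intro p r t₂ rest hw h1 h2 hnm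
    obtain ⟨q, s⟩ := qs
    have hq : q ≠ [] := (hw (q, s) (by simp)).1
    have hs : s ≠ [] := (hw (q, s) (by simp)).2
    have hstep : pvApplyAll (((q, s) :: t₁') ++ (p, r) :: t₂) (p ++ rest)
        = pvApplyAll (t₁' ++ (p, r) :: t₂) (PySem.Chars.replace (p ++ rest) q s) := rfl
    have hqhead : q.headI ∉ p.drop 1 := by
      have := (List.pairwise_cons.mp h1)
      have h2' := (List.pairwise_cons.mp h2).1
      exact h2' (p, r) (by simp)
    rw [hstep, pvReplace_pass q s hq p rest (hnm (q, s) List.mem_cons_self)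
      (fun ch hch hce => hqhead (hce ▸ hch))]
    have hsdisj : ∀ pr ∈ t₁' ++ (p, r) :: t₂, ∀ ch ∈ s, ch ∉ pr.1 := by
      intro pr hpr ch hch
      exact (List.pairwise_cons.mp h1).1 pr hpr ch hch
    have hnm' : ∀ q' ∈ t₁', ¬ q'.1 <+: (p ++ PySem.Chars.replace rest q s) := by
      intro q' hq' hcon
      have hq'1 : q'.1 ≠ [] := (hw q' (by simp [hq'])).1
      by_cases hlen : q'.1.length ≤ p.length
      · have hpp : q'.1 <+: p :=
          List.prefix_of_prefix_length_le hcon (List.prefix_append p _) hlen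
        exact hnm q' (List.mem_cons_of_mem _ hq') (hpp.trans (List.prefix_append p rest))
      · have hple : p <+: q'.1 :=
          List.prefix_of_prefix_length_le (List.prefix_append p _) hcon (by omega)
        obtain ⟨w, hw'⟩ := hple
        have hwpre : w <+: PySem.Chars.replace rest q s := by
          have : (p ++ w) <+: (p ++ PySem.Chars.replace rest q s) := hw' ▸ hcon
          exact (List.prefix_append_right_inj p).mp this
        have hdisj : ∀ ch ∈ s, ch ∉ w := by
          intro ch hch hin
          exact hsdisj q' (by simp [hq']) ch hch (by rw [← hw']; simp [hin])
        have := pvPrefix_pullback q s hq hs rest.length rest w (le_refl _) hdisj hwpre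
        exact hnm q' (List.mem_cons_of_mem _ hq')
          (by rw [← hw']; exact (List.prefix_append_right_inj p).mpr this)
    have hwf' : ∀ pr ∈ t₁' ++ (p, r) :: t₂, pr.1 ≠ [] ∧ pr.2 ≠ [] :=
      fun pr hpr => hw pr (List.mem_cons_of_mem _ hpr)
    have h1' := (List.pairwise_cons.mp h1).2
    have h2' := (List.pairwise_cons.mp h2).2
    rw [ih p r t₂ (PySem.Chars.replace rest q s) hwf' h1' h2' hnm']
    have hstep2 : pvApplyAll (((q, s) :: t₁') ++ (p, r) :: t₂) rest
        = pvApplyAll (t₁' ++ (p, r) :: t₂) (PySem.Chars.replace rest q s) := rfl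
    rw [hstep2]

-- -------- the concrete table satisfies the conditions --------

theorem pvTab_wf : ∀ pr ∈ pvTable, pr.1 ≠ [] ∧ pr.2 ≠ [] := by decide

theorem pvTab_h1 : pvTable.Pairwise (fun a b => ∀ ch ∈ a.2, ch ∉ b.1) := by
  have h : pvTable.Pairwise (fun a b => a.2.all (fun ch => !b.1.contains ch) = true) := by decide
  refine h.imp ?_
  intro a b hab ch hch
  simp only [List.all_eq_true] at hab
  simpa using hab ch hch

theorem pvTab_h2 : pvTable.Pairwise (fun a b => a.1.headI ∉ b.1.drop 1) := by decide

-- -------- main equivalence at the char-list level --------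

theorem pvApplyAll_eq_scan : ∀ (f : Nat) (l : List Char), l.length ≤ f →
    pvApplyAll pvTable l = pvScanGo f l := by
  intro f
  induction f with
  | zero =>
    intro l hl
    have : l = [] := by cases l <;> simp_all
    subst this
    rw [pvApplyAll_nil pvTable (fun pr hpr => (pvTab_wf pr hpr).1)]
    rfl
  | succ n ih =>
    intro l hl
    cases l with
    | nil =>
      rw [pvApplyAll_nil pvTable (fun pr hpr => (pvTab_wf pr hpr).1)]
      rfl
    | cons c t =>
      cases hf : pvTable.find? (fun pr => pr.1.isPrefixOf (c :: t)) with
      | some pr =>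
        obtain ⟨p, r⟩ := pr
        obtain ⟨hsat, as, bs, htab, hfail⟩ := List.find?_eq_some_iff_append.mp hf
        have hpre : p <+: (c :: t) := by simpa [List.isPrefixOf_iff_prefix] using hsat
        have hppos : 0 < p.length := by
          have hne : ∀ pr ∈ pvTable, 0 < pr.1.length := by decide
          exact hne (p, r) (htab ▸ (by simp))
        obtain ⟨rest, hrest⟩ := hpre
        have hnm : ∀ q ∈ as, ¬ q.1 <+: (p ++ rest) := by
          intro q hq hcon
          have hfa : q.1.isPrefixOf (c :: t) = false := by simpa using hfail q hq
          rw [hrest] at hcon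
          rw [List.isPrefixOf_iff_prefix.mpr hcon] at hfa
          simp at hfa
        have hmatch := pvApplyAll_match as p r bs rest
          (htab ▸ pvTab_wf) (htab ▸ pvTab_h1) (htab ▸ pvTab_h2) hnm
        rw [← htab] at hmatch
        have ihrest : pvApplyAll pvTable rest = pvScanGo n rest := by
          apply ih
          have : (c :: t).length = p.length + rest.length := by rw [← hrest]; simp
          simp only [List.length_cons] at hl this
          omega
        rw [← hrest, hmatch, ihrest]
        conv_rhs => rw [hrest, pvScanGo.eq_def]
        simp only [hf]
        rw [← hrest, List.drop_left]
      | none =>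
        have hnone : ∀ pr ∈ pvTable, ¬ pr.1 <+: (c :: t) := by
          intro pr hpr
          have := List.find?_eq_none.mp hf pr hpr
          simpa [List.isPrefixOf_iff_prefix] using this
        rw [pvApplyAll_nomatch pvTable c t pvTab_wf pvTab_h1 hnone]
        rw [ih t (by simp at hl; omega)]
        conv_rhs => rw [pvScanGo.eq_def]
        simp only [hf]

-- ===== VERDICT (by name: the statement is the Claim_ definition above) =====
theorem fix_state_label_spec : Claim_equal_fix_state_label := by
  intro label _hdom
  unfold Spec_fix_state_label
  refine String.toList_inj.mp ?_
  have hB : fix_state_label_alt label = String.ofList (pvScanGo label.toList.length label.toList) := rfl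
  rw [hB, String.toList_ofList]
  rw [← pvApplyAll_eq_scan label.toList.length label.toList (le_refl _)]
  simp only [fix_state_label, pvREPLACES, List.foldl_cons, List.foldl_nil,
    PySem.Str.toList_replace]
  simp only [pvApplyAll, pvTable, List.foldl_cons, List.foldl_nil]
  rfl
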